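-- pv_equiv track=rewrite | github.com/jinzhao3611/UMR_Release_2_0 | scripts/format_sanapana_1_0.py | align_rows
-- ===== SOURCE A (Python) =====
-- def align_rows(rows):
--     """
--     Aligns rows of tokens into columns.
--     rows: list of lists, e.g. [
--       ["Index:", "1", "2"],
--       ["Words:", "anyentehlehlta", "ampay'avehla'"],
--       ["Morphemes:", "an-", "yentehl", "-e", "=hlta", ...],
--       ...
--     ]
--     Returns a list of aligned strings, one per row.
--     """
--     if not rows:
--         return []
--
--     # Find how many columns in the widest row
--     max_cols = max(len(r) for r in rows)
--
--     # Compute max width per column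
--     col_widths = [0] * max_cols
--     for row in rows:
--         for c, cell in enumerate(row):
--             col_widths[c] = max(col_widths[c], len(cell))
--
--     # Build aligned lines
--     aligned_lines = []
--     for row in rows:
--         padded_cells = []
--         for c, cell in enumerate(row):
--             padded_cells.append(cell.ljust(col_widths[c]))
--         # Join columns with a single space
--         aligned_lines.append(" ".join(padded_cells))
--
--     return aligned_lines
-- ===== SOURCE B (Python) =====
-- def align_rows(rows):
--     """
--     Aligns rows of tokens into padded columns (same contract as A), but by a
--     column-major construction: each output line is grown across the columns,
--     one column at a time; the width of a column is found just before that
--     column is appended, so there is no width array and no per-row join.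
--     """
--     if not rows:
--         return []
--     lines = ["" for _ in rows]
--     c = 0
--     while any(c < len(r) for r in rows):
--         w = max(len(r[c]) for r in rows if c < len(r))
--         sep = " " if c else ""
--         for i, r in enumerate(rows):
--             if c < len(r):
--                 lines[i] += sep + r[c].ljust(w)
--         c += 1
--     return lines
-- ===== Notes on version B (the rewrite author's own statement) =====
-- stated objective: alternative
-- what changed: B builds the output column-major: a while loop over column indices grows every output line by one padded cell per iteration (computing each column's width on the fly), instead of A's two row-major passes with a width array and a per-row ljust/join.
import Mathlib
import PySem

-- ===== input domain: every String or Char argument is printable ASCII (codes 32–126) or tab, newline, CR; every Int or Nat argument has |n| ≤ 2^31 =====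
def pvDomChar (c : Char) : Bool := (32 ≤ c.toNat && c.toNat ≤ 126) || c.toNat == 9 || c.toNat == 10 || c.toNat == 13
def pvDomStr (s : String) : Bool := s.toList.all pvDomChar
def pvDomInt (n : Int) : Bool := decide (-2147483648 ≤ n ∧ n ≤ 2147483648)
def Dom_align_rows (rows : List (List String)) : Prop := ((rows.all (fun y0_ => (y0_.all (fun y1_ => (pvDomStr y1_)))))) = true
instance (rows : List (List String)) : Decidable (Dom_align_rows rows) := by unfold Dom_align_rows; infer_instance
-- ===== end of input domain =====

-- B builds the output column-major: each output line is grown across the columns one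
-- column at a time (width found per column on the fly), instead of A's width array +
-- per-row ljust/join pass; objective: alternative. Both total; A = B on every input.

-- exact port of str.ljust(w) (pads with spaces on the right, never truncates) — used by both ports, as both Pythons call .ljust
def pyLjust (s : String) (w : Nat) : String :=
  String.ofList (s.toList ++ List.replicate (w - s.toList.length) ' ')

-- ===== PORT A =====
-- 'for c, cell in enumerate(row): col_widths[c] = max(col_widths[c], len(cell))'
def alignRowLoop (ws : List Nat) (c : Nat) (row : List String) : List Nat :=
  match row with
  | [] => ws
  | cell :: rest => alignRowLoop (ws.set c (max (ws.getD c 0) (cell.toList.length))) (c + 1) rest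

-- 'for c, cell in enumerate(row): padded_cells.append(cell.ljust(col_widths[c]))'
def padRowLoop (ws : List Nat) (c : Nat) (row : List String) : List String :=
  match row with
  | [] => []
  | cell :: rest => pyLjust cell (ws.getD c 0) :: padRowLoop ws (c + 1) rest

def align_rows (rows : List (List String)) : List String :=
  if rows = [] then []
  else
    -- max(len(r) for r in rows): running max, exact here since rows ≠ [] and lengths are Nats
    let maxCols : Nat := (rows.map (fun r => r.length)).foldl max 0
    let colWidths := rows.foldl (fun ws row => alignRowLoop ws 0 row) (List.replicate maxCols 0)
    rows.foldl (fun lines row => lines ++ [PySem.Str.join " " (padRowLoop colWidths 0 row)]) []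

-- ===== PORT B =====
-- 'max(len(r[c]) for r in rows if c < len(r))' (the loop guard makes the generator nonempty)
def colMax (rows : List (List String)) (c : Nat) : Nat :=
  (rows.filterMap (fun r => if c < r.length then some ((r.getD c "").toList.length) else none)).foldl max 0

-- termination of the while loop: the guard puts c strictly below the longest row length
theorem lt_maxCols_of_any (rows : List (List String)) (c : Nat)
    (h : rows.any (fun r => decide (c < r.length)) = true) :
    c < (rows.map (fun r => r.length)).foldl max 0 := by
  rcases List.any_eq_true.mp h with ⟨r, hr, hc⟩
  have hle := (PySem.List.le_foldl_max_nat rows (fun r => r.length) 0).2 r hr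
  simp only [List.foldl_map] at hle ⊢
  have := of_decide_eq_true hc
  omega

-- 'while any(c < len(r) for r in rows): … lines[i] += sep + r[c].ljust(w) …'
def buildCols (rows : List (List String)) (c : Nat) (lines : List String) : List String :=
  if h : rows.any (fun r => decide (c < r.length)) = true then
    let w := colMax rows c
    let sep : String := if c = 0 then "" else " "
    buildCols rows (c + 1)
      ((rows.zip lines).map (fun p =>
        if c < p.1.length then p.2 ++ sep ++ pyLjust (p.1.getD c "") w else p.2))
  else lines
termination_by (rows.map (fun r => r.length)).foldl max 0 - c
decreasing_by
  have := lt_maxCols_of_any rows c h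
  omega

def align_rows_alt (rows : List (List String)) : List String :=
  if rows = [] then []
  else buildCols rows 0 (rows.map (fun _ => ""))

-- ===== PRECONDITION & SPEC =====
def Spec_align_rows (rows : List (List String)) (out : List String) : Prop := out = align_rows_alt rows
instance (rows : List (List String)) (out : List String) : Decidable (Spec_align_rows rows out) := by unfold Spec_align_rows; infer_instance

-- ===== CLAIM (what is proved, stated in full; the proofs are below) =====
def Claim_equal_align_rows : Prop := ∀ (rows : List (List String)), Dom_align_rows rows → Spec_align_rows rows (align_rows rows)

-- ===== LEMMAS AND PROOFS =====

-- ---- A-side characterisation (widths array) ----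

theorem alignRowLoop_length (row : List String) (ws : List Nat) (c : Nat) :
    (alignRowLoop ws c row).length = ws.length := by
  induction row generalizing ws c with
  | nil => rfl
  | cons cell rest ih => simp [alignRowLoop, ih]

theorem foldl_max_init (l : List Nat) (a b : Nat) :
    l.foldl max (max a b) = max a (l.foldl max b) := by
  induction l generalizing b with
  | nil => rfl
  | cons x t ih => simpa [List.foldl_cons, Nat.max_assoc] using ih (max b x)

theorem alignRowLoop_getD (row : List String) (ws : List Nat) (c0 j : Nat)
    (h : c0 + row.length ≤ ws.length) :
    (alignRowLoop ws c0 row).getD j 0 =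
      if c0 ≤ j ∧ j < c0 + row.length
      then max (ws.getD j 0) (row.getD (j - c0) "").toList.length
      else ws.getD j 0 := by
  induction row generalizing ws c0 with
  | nil =>
    simp only [alignRowLoop, List.length_nil]
    rw [if_neg (by omega)]
  | cons cell rest ih =>
    simp only [List.length_cons] at h
    have hc0 : c0 < ws.length := by omega
    simp only [alignRowLoop]
    rw [ih _ (c0 + 1) (by simp only [List.length_set]; omega)]
    by_cases h1 : c0 + 1 ≤ j ∧ j < c0 + 1 + rest.length
    · rw [if_pos h1, if_pos (by simp only [List.length_cons]; omega)]
      have hne : c0 ≠ j := by omega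
      have hset : (ws.set c0 (max (ws.getD c0 0) cell.toList.length)).getD j 0 = ws.getD j 0 := by
        simp [List.getD_eq_getElem?_getD, hne]
      rw [hset]
      have hidx : ((cell :: rest).getD (j - c0) "") = rest.getD (j - (c0 + 1)) "" := by
        have hj : j - c0 = (j - (c0 + 1)) + 1 := by omega
        simp [hj]
      rw [hidx]
    · by_cases h2 : j = c0
      · subst h2
        rw [if_neg h1, if_pos (by simp only [List.length_cons]; omega)]
        simp [List.getD_eq_getElem?_getD, hc0]
      · rw [if_neg h1, if_neg (by simp only [List.length_cons]; omega)]
        simp [List.getD_eq_getElem?_getD, Ne.symm h2]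

theorem colMax_cons (r : List String) (rs : List (List String)) (j : Nat) :
    colMax (r :: rs) j =
      if j < r.length then max (r.getD j "").toList.length (colMax rs j)
      else colMax rs j := by
  unfold colMax
  by_cases h : j < r.length
  · rw [List.filterMap_cons]
    simp only [if_pos h, List.foldl_cons]
    have := foldl_max_init (List.filterMap
      (fun r => if j < r.length then some (r.getD j "").toList.length else none) rs)
      (r.getD j "").toList.length 0
    simpa [Nat.max_comm] using this
  · rw [List.filterMap_cons]
    simp [h]

theorem widths_getD (rs : List (List String)) (ws : List Nat)
    (h : ∀ r ∈ rs, r.length ≤ ws.length) (j : Nat) :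
    (rs.foldl (fun ws row => alignRowLoop ws 0 row) ws).getD j 0 =
      max (ws.getD j 0) (colMax rs j) := by
  induction rs generalizing ws with
  | nil => simp [colMax]
  | cons r t ih =>
    simp only [List.foldl_cons]
    rw [ih _ (fun r' hr' => by
      rw [alignRowLoop_length]; exact h r' (List.mem_cons_of_mem _ hr'))]
    rw [alignRowLoop_getD r ws 0 j (by simpa using h r (List.mem_cons_self ..))]
    rw [colMax_cons]
    by_cases hj : j < r.length
    · rw [if_pos (by omega), if_pos hj]
      simp only [Nat.sub_zero]
      omega
    · rw [if_neg (by omega), if_neg hj]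

-- ---- B-side characterisation (column-major construction) ----

-- the padded cells of row r from column c on (widths per colMax)
def padTail (rows : List (List String)) (r : List String) (c : Nat) : List String :=
  if c < r.length then pyLjust (r.getD c "") (colMax rows c) :: padTail rows r (c + 1) else []
termination_by r.length - c

-- concatenation ' ' ++ cell for every remaining cell
def tailCat : List String → String
  | [] => ""
  | x :: xs => (" " ++ x) ++ tailCat xs

-- what the while loop still appends to row r's line from column c on
def tailStr (rows : List (List String)) (r : List String) (c : Nat) : String :=
  if c < r.length then
    ((if c = 0 then "" else " ") ++ pyLjust (r.getD c "") (colMax rows c)) ++ tailStr rows r (c + 1)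
  else ""
termination_by r.length - c

theorem tailStr_of_pos (rows : List (List String)) (r : List String) (c : Nat) (hc : 1 ≤ c) :
    tailStr rows r c = tailCat (padTail rows r c) := by
  generalize hm : r.length - c = m
  induction m generalizing c with
  | zero =>
    rw [tailStr, padTail, if_neg (by omega), if_neg (by omega)]
    rfl
  | succ n ih =>
    by_cases h : c < r.length
    · rw [tailStr, padTail, if_pos h, if_pos h, if_neg (by omega)]
      rw [ih (c + 1) (by omega) (by omega)]
      rfl
    · rw [tailStr, padTail, if_neg h, if_neg h]
      rfl

theorem join_eq_tailCat (x : String) (xs : List String) :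
    PySem.Str.join " " (x :: xs) = x ++ tailCat xs := by
  induction xs generalizing x with
  | nil =>
    simp [PySem.Str.join, PySem.Chars.join, List.intercalate, tailCat]
  | cons y rest ih =>
    have hstep : PySem.Str.join " " (x :: y :: rest) = x ++ " " ++ PySem.Str.join " " (y :: rest) := by
      simp only [PySem.Str.join, List.map_cons]
      rw [PySem.Chars.join_cons_cons]
      rw [String.ofList_append, String.ofList_append, String.ofList_toList]
      rfl
    rw [hstep, ih y, tailCat, String.append_assoc, String.append_assoc]

theorem tailStr_zero (rows : List (List String)) (r : List String) :
    tailStr rows r 0 = PySem.Str.join " " (padTail rows r 0) := by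
  by_cases h : 0 < r.length
  · rw [tailStr, padTail, if_pos h, if_pos h]
    rw [tailStr_of_pos rows r 1 le_rfl, join_eq_tailCat]
    simp [String.empty_append]
  · rw [tailStr, padTail, if_neg h, if_neg h]
    rfl

theorem padTail_eq_padRowLoop (rows : List (List String)) (r : List String) (ws : List Nat)
    (hw : ∀ j, j < r.length → ws.getD j 0 = colMax rows j) (c : Nat) :
    padTail rows r c = padRowLoop ws c (r.drop c) := by
  generalize hm : r.length - c = m
  induction m generalizing c with
  | zero =>
    rw [padTail, if_neg (by omega), List.drop_eq_nil_of_le (by omega)]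
    rfl
  | succ n ih =>
    by_cases h : c < r.length
    · rw [padTail, if_pos h, List.drop_eq_getElem_cons h]
      simp only [padRowLoop]
      rw [ih (c + 1) (by omega), hw c h, List.getD_eq_getElem r "" h]
    · rw [padTail, if_neg h, List.drop_eq_nil_of_le (by omega)]
      rfl

theorem zip_map_zip {α β γ : Type} (l1 : List α) (l2 : List β) (f : α × β → γ) :
    l1.zip ((l1.zip l2).map f) = (l1.zip l2).map (fun p => (p.1, f p)) := by
  induction l1 generalizing l2 with
  | nil => rfl
  | cons a t ih =>
    cases l2 with
    | nil => rfl
    | cons b u => simp [List.zip_cons_cons, ih]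

theorem map_snd_zip_self {α β : Type} (l1 : List α) (l2 : List β) (h : l2.length = l1.length) :
    (l1.zip l2).map Prod.snd = l2 := by
  induction l1 generalizing l2 with
  | nil => cases l2 with | nil => rfl | cons b u => simp at h
  | cons a t ih =>
    cases l2 with
    | nil => simp at h
    | cons b u =>
      simp only [List.zip_cons_cons, List.map_cons]
      rw [ih u (by simpa using h)]

theorem buildCols_eq (rows : List (List String)) (c : Nat) (lines : List String)
    (hlen : lines.length = rows.length) :
    buildCols rows c lines = (rows.zip lines).map (fun p => p.2 ++ tailStr rows p.1 c) := by
  generalize hm : (rows.map (fun r => r.length)).foldl max 0 - c = m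
  induction m generalizing c lines with
  | zero =>
    have hnone : ¬ (rows.any (fun r => decide (c < r.length)) = true) := by
      intro h
      have := lt_maxCols_of_any rows c h
      omega
    rw [buildCols, dif_neg hnone]
    have : ∀ p ∈ rows.zip lines, (fun p : List String × String => p.2 ++ tailStr rows p.1 c) p = Prod.snd p := by
      intro p hp
      have hmem := (List.of_mem_zip hp).1
      have hshort : ¬ c < p.1.length := by
        intro hlt
        exact hnone (List.any_eq_true.mpr ⟨p.1, hmem, decide_eq_true hlt⟩)
      simp only
      rw [tailStr, if_neg hshort, String.append_empty]
    rw [List.map_congr_left this, map_snd_zip_self rows lines hlen]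
  | succ n ih =>
    by_cases hany : rows.any (fun r => decide (c < r.length)) = true
    · rw [buildCols, dif_pos hany]
      set f : List String × String → String := fun p =>
        if c < p.1.length then p.2 ++ (if c = 0 then "" else " ") ++ pyLjust (p.1.getD c "") (colMax rows c) else p.2 with hf
      have hlen' : ((rows.zip lines).map f).length = rows.length := by
        simp [List.length_zip, hlen]
      rw [ih (c + 1) _ hlen' (by have := lt_maxCols_of_any rows c hany; omega)]
      rw [zip_map_zip, List.map_map]
      apply List.map_congr_left
      intro p hp
      simp only [Function.comp, hf]
      by_cases hlt : c < p.1.length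
      · rw [if_pos hlt]
        conv_rhs => rw [tailStr, if_pos hlt]
        simp only [String.append_assoc]
      · rw [if_neg hlt]
        conv_rhs => rw [tailStr, if_neg hlt]
        have h1 : ¬ c + 1 < p.1.length := by omega
        rw [tailStr, if_neg h1]
    · rw [buildCols, dif_neg hany]
      have heq : ∀ p ∈ rows.zip lines, (fun p : List String × String => p.2 ++ tailStr rows p.1 c) p = Prod.snd p := by
        intro p hp
        have hmem := (List.of_mem_zip hp).1
        have hshort : ¬ c < p.1.length := by
          intro hlt
          exact hany (List.any_eq_true.mpr ⟨p.1, hmem, decide_eq_true hlt⟩)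
        simp only
        rw [tailStr, if_neg hshort, String.append_empty]
      rw [List.map_congr_left heq, map_snd_zip_self rows lines hlen]

theorem align_rows_eq (rows : List (List String)) :
    align_rows rows = align_rows_alt rows := by
  by_cases hnil : rows = []
  · simp [align_rows, align_rows_alt, hnil]
  · have hbound : ∀ r ∈ rows, r.length ≤ (rows.map (fun r => r.length)).foldl max 0 := by
      intro r hr
      have := (PySem.List.le_foldl_max_nat rows (fun r => r.length) 0).2 r hr
      simpa [List.foldl_map] using this
    set maxCols := (rows.map (fun r => r.length)).foldl max 0 with hmc
    set ws := rows.foldl (fun ws row => alignRowLoop ws 0 row) (List.replicate maxCols 0) with hws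
    have hwsget : ∀ j, j < maxCols → ws.getD j 0 = colMax rows j := by
      intro j hj
      rw [hws, widths_getD rows _ (fun r hr => by simpa using hbound r hr) j]
      simp [List.getD_eq_getElem?_getD, hj]
    unfold align_rows align_rows_alt
    rw [if_neg hnil, if_neg hnil]
    rw [buildCols_eq rows 0 (rows.map (fun _ => "")) (by simp)]
    have hzip : ∀ (l : List (List String)), l.zip (l.map (fun _ => ("" : String))) = l.map (fun r => (r, ("" : String))) := by
      intro l
      induction l with
      | nil => rfl
      | cons a t iht => simp only [List.map_cons, List.zip_cons_cons, iht]
    rw [hzip rows, List.map_map]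
    simp only [PySem.List.foldl_append_singleton_eq_map, List.nil_append]
    apply List.map_congr_left
    intro r hr
    simp only [Function.comp]
    rw [String.empty_append, tailStr_zero]
    rw [padTail_eq_padRowLoop rows r ws
      (fun j hj => hwsget j (Nat.lt_of_lt_of_le hj (hbound r hr))) 0]
    rfl

-- ===== VERDICT (by name: the statement is the Claim_ definition above) =====
theorem align_rows_spec : Claim_equal_align_rows := by
  intro rows _
  unfold Spec_align_rows
  exact align_rows_eq rows
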